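-- pv_equiv track=rewrite | github.com/kudelskisecurity/fuzzomatic | fuzzomatic/eval_results.py | strip_libfuzzer_error
-- ===== SOURCE A (Python) =====
-- def strip_libfuzzer_error(runtime_error):
--     lines = runtime_error.split("\n")
--     kept_lines = []
--     skip = True
--     for line in lines:
--         if "thread" in line and "panicked" in line:
--             skip = False
--
--         if not skip:
--             kept_lines.append(line)
--
--     stripped_error = "\n".join(kept_lines)
--     return stripped_error
-- ===== SOURCE B (Python) =====
-- def strip_libfuzzer_error(runtime_error):
--     # Reverse pass: build the joined suffix incrementally while scanning the
--     # lines back-to-front; each time a panic line is seen, the current suffix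
--     # becomes the candidate answer (the last write, i.e. the first panic line
--     # in original order, wins). No slicing and no final join.
--     suffix = None
--     result = ""
--     for line in reversed(runtime_error.split("\n")):
--         suffix = line if suffix is None else line + "\n" + suffix
--         if "thread" in line and "panicked" in line:
--             result = suffix
--     return result
-- ===== Notes on version B (the rewrite author's own statement) =====
-- stated objective: alternative
-- what changed: Replaces A's forward skip-flag accumulate-then-join loop with a single reverse pass that builds the joined suffix string incrementally and records it as the answer whenever a panic line is seen (the last write, i.e. the first panic line in original order, wins); no slicing and no final join.
import Mathlib
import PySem

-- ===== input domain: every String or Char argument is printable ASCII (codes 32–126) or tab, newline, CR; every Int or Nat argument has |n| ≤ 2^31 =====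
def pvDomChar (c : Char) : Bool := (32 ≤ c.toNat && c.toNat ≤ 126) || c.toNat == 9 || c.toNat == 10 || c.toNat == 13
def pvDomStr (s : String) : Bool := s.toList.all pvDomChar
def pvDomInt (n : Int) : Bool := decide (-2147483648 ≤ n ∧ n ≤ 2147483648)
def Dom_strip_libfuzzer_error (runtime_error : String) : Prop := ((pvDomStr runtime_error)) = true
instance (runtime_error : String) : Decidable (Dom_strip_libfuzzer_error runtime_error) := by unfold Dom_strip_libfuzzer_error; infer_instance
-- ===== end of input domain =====

-- B replaces A's forward skip-flag loop by a single reverse pass that builds the joined suffix incrementally (no slicing, no final join); alternative decomposition, same cost.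


-- ===== PORT A =====
-- '"thread" in line and "panicked" in line' (the same test appears verbatim in A and in B)
def pvPanicLine (line : String) : Bool :=
  PySem.Str.isIn "thread" line && PySem.Str.isIn "panicked" line

-- A's loop body: update skip, then append the line iff not skip
def pvStepA (st : List String × Bool) (line : String) : List String × Bool :=
  let skip := if pvPanicLine line then false else st.2
  if !skip then (st.1 ++ [line], skip) else (st.1, skip)

def strip_libfuzzer_error (runtime_error : String) : String :=
  -- s.split("\n"): the separator is the nonempty literal "\n", so split? is always some
  let lines := (PySem.Str.split? runtime_error "\n").getD []
  let st := lines.foldl pvStepA (([] : List String), true)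
  PySem.Str.join "\n" st.1

-- ===== PORT B =====
-- Python str '+' is concatenation of code points; ported exactly as list append on toList
def pvCat (a b : String) : String := String.ofList (a.toList ++ b.toList)

-- body of B's 'for line in reversed(lines)' loop; the reversed iteration is List.foldr
def pvStepB (line : String) (st : Option String × String) : Option String × String :=
  let suffix := match st.1 with
    | none => line
    | some s => pvCat line (pvCat "\n" s)
  (some suffix, if pvPanicLine line then suffix else st.2)

def strip_libfuzzer_error_alt (runtime_error : String) : String :=
  let lines := (PySem.Str.split? runtime_error "\n").getD []
  (lines.foldr pvStepB (none, "")).2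

-- ===== PRECONDITION & SPEC =====
def Spec_strip_libfuzzer_error (runtime_error : String) (out : String) : Prop := out = strip_libfuzzer_error_alt runtime_error
instance (runtime_error : String) (out : String) : Decidable (Spec_strip_libfuzzer_error runtime_error out) := by unfold Spec_strip_libfuzzer_error; infer_instance

-- ===== CLAIM (what is proved, stated in full; the proofs are below) =====
def Claim_equal_strip_libfuzzer_error : Prop := ∀ (runtime_error : String), Dom_strip_libfuzzer_error runtime_error → Spec_strip_libfuzzer_error runtime_error (strip_libfuzzer_error runtime_error)

-- ===== LEMMAS AND PROOFS =====

-- joining a single line is that line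
theorem pv_join_single (a : String) : PySem.Str.join "\n" [a] = a := by
  simp [PySem.Str.join, PySem.Chars.join, List.intercalate]

-- Once skip is false, A's loop appends every remaining line.
theorem loopA_noskip (ls : List String) (acc : List String) :
    (ls.foldl pvStepA (acc, false)).1 = acc ++ ls := by
  induction ls generalizing acc with
  | nil => simp
  | cons a t ih =>
    have hstep : pvStepA (acc, false) a = (acc ++ [a], false) := by
      simp [pvStepA]
    rw [List.foldl_cons, hstep, ih]
    simp

-- While skip is true, A's loop collects exactly the suffix from the first panic line.
theorem loopA_skip (ls : List String) (acc : List String) :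
    (ls.foldl pvStepA (acc, true)).1
    = acc ++ (match ls.findIdx? pvPanicLine with
              | none => []
              | some i => ls.drop i) := by
  induction ls generalizing acc with
  | nil => simp
  | cons a t ih =>
    cases h : pvPanicLine a with
    | true =>
      have hstep : pvStepA (acc, true) a = (acc ++ [a], false) := by
        simp [pvStepA, h]
      rw [List.foldl_cons, hstep, loopA_noskip, List.findIdx?_cons]
      simp [h]
    | false =>
      have hstep : pvStepA (acc, true) a = (acc, true) := by
        simp [pvStepA, h]
      rw [List.foldl_cons, hstep, ih, List.findIdx?_cons]
      cases hf : t.findIdx? pvPanicLine <;> simp [h]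

-- B's reverse pass maintains the joined suffix of the lines seen so far.
theorem loopB_fst (ls : List String) :
    (ls.foldr pvStepB (none, "")).1
    = match ls with
      | [] => none
      | _ => some (PySem.Str.join "\n" ls) := by
  induction ls with
  | nil => rfl
  | cons a t ih =>
    cases t with
    | nil =>
      simp [pvStepB, pv_join_single]
    | cons b r =>
      rw [List.foldr_cons, pvStepB, ih]
      simp [pvCat, PySem.Str.join, PySem.Chars.join_cons_cons]

-- B's candidate answer is the joined suffix from the first panic line (overwritten last).
theorem loopB_snd (ls : List String) :
    (ls.foldr pvStepB (none, "")).2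
    = match ls.findIdx? pvPanicLine with
      | none => ""
      | some i => PySem.Str.join "\n" (ls.drop i) := by
  induction ls with
  | nil => rfl
  | cons a t ih =>
    rw [List.foldr_cons, pvStepB, loopB_fst, List.findIdx?_cons]
    cases h : pvPanicLine a with
    | true =>
      cases t with
      | nil => simp [pv_join_single]
      | cons b r =>
        simp [pvCat, PySem.Str.join, PySem.Chars.join_cons_cons]
    | false =>
      rw [ih]
      cases hf : t.findIdx? pvPanicLine <;> simp

-- ===== VERDICT (by name: the statement is the Claim_ definition above) =====
theorem strip_libfuzzer_error_spec : Claim_equal_strip_libfuzzer_error := by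
  intro s _
  show strip_libfuzzer_error s = strip_libfuzzer_error_alt s
  simp only [strip_libfuzzer_error, strip_libfuzzer_error_alt]
  rw [loopA_skip, loopB_snd]
  cases h : ((PySem.Str.split? s "\n").getD []).findIdx? pvPanicLine with
  | none => simp; rfl
  | some i => simp
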